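-- pv_equiv track=rewrite | github.com/jhnlynn/playstation | maxNumberofTeamsCanBeFormedwithGivenPersons/maxNumberofTeamsCanBeFormedwithGivenPersons.py | max_can_form
-- ===== SOURCE A (Python) =====
-- def max_can_form(n, m):
--     def canFormTeam(n, m):
--         # 1 person of Type1 and 2 persons of Type2
--         # can be chosen
--         if n >= 1 and m >= 2:
--             return True
--
--         # 1 person of Type2 and 2 persons of Type1
--         # can be chosen
--         if m >= 1 and n >= 2:
--             return True
--
--         # Cannot from a team
--         return False
--
--     # To store the required count of teams formed
--     count = 0
--
--     while canFormTeam(n, m):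
--         if n > m:
--             # Choose 2 persons of Type1
--             n -= 2
--
--             # And 1 person of Type2
--             m -= 1
--
--         else:
--             # Choose 2 persons of Type2
--             m -= 2
--
--             # And 1 person of Type1
--             n -= 1
--
--             # Another team has been formed
--         count += 1
--
--     return count
-- ===== SOURCE B (Python) =====
-- def max_can_form(n, m):
--     # Each team uses 3 people, at least one of each type, so the answer
--     # is capped by n, by m, and by (n + m) // 3; all three caps are achievable.
--     return max(0, min(n, m, (n + m) // 3))
-- ===== Notes on version B (the rewrite author's own statement) =====
-- stated objective: faster
-- what changed: Replaces the team-by-team greedy while-loop with the closed form max(0, min(n, m, (n+m)//3)).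
import Mathlib
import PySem

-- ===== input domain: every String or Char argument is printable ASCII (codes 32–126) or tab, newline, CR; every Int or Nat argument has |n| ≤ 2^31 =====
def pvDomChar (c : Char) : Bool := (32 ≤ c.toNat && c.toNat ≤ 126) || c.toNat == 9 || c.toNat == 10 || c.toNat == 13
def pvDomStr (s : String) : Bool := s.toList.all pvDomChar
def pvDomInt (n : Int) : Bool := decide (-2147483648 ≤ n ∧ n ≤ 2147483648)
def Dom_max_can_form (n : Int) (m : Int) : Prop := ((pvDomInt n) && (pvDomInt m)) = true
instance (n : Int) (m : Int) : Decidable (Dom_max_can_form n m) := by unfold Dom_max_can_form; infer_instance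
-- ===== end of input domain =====

-- B replaces A's team-by-team greedy while-loop with the closed form
-- max(0, min(n, m, (n+m)//3)) (O(1) instead of O(n+m)).


-- ===== PORT A =====
-- A's inner helper canFormTeam
def canFormTeam (n : Int) (m : Int) : Bool :=
  if n ≥ 1 ∧ m ≥ 2 then true
  else if m ≥ 1 ∧ n ≥ 2 then true
  else false

-- A's while-loop, as structural recursion on the same state (n, m, count)
def maxCanFormLoop (n : Int) (m : Int) (count : Int) : Int :=
  if h : canFormTeam n m then
    if n > m then maxCanFormLoop (n - 2) (m - 1) (count + 1)
    else maxCanFormLoop (n - 1) (m - 2) (count + 1)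
  else count
termination_by (n + m).toNat
decreasing_by
  · simp [canFormTeam] at h; omega
  · simp [canFormTeam] at h; omega

def max_can_form (n : Int) (m : Int) : Int := maxCanFormLoop n m 0

-- ===== PORT B =====
def max_can_form_alt (n : Int) (m : Int) : Int :=
  max 0 (min n (min m (PySem.Int.floordiv (n + m) 3)))

-- ===== PRECONDITION & SPEC =====
def Spec_max_can_form (n : Int) (m : Int) (out : Int) : Prop := out = max_can_form_alt n m
instance (n : Int) (m : Int) (out : Int) : Decidable (Spec_max_can_form n m out) := by unfold Spec_max_can_form; infer_instance

-- ===== CLAIM (what is proved, stated in full; the proofs are below) =====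
def Claim_equal_max_can_form : Prop := ∀ (n : Int) (m : Int), Dom_max_can_form n m → Spec_max_can_form n m (max_can_form n m)

-- ===== LEMMAS AND PROOFS =====
-- Loop invariant: the loop adds the closed form to its accumulator.
theorem maxCanFormLoop_eq (n m count : Int) :
    maxCanFormLoop n m count = count + max 0 (min n (min m (PySem.Int.floordiv (n + m) 3))) := by
  by_cases h : canFormTeam n m = true
  · have hc : (n ≥ 1 ∧ m ≥ 2) ∨ (m ≥ 1 ∧ n ≥ 2) := by
      simp [canFormTeam] at h; omega
    rw [maxCanFormLoop, dif_pos h]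
    have h3 : (0:Int) < 3 := by omega
    by_cases hnm : n > m
    · rw [maxCanFormLoop_eq (n - 2) (m - 1) (count + 1)]
      rw [PySem.Int.floordiv_eq_ediv_of_pos h3, PySem.Int.floordiv_eq_ediv_of_pos h3]
      have : n - 2 + (m - 1) = (n + m) - 3 := by ring
      rw [this]
      omega
    · rw [if_neg hnm, maxCanFormLoop_eq (n - 1) (m - 2) (count + 1)]
      rw [PySem.Int.floordiv_eq_ediv_of_pos h3, PySem.Int.floordiv_eq_ediv_of_pos h3]
      have : n - 1 + (m - 2) = (n + m) - 3 := by ring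
      rw [this]
      omega
  · rw [maxCanFormLoop, dif_neg h]
    have hc : ¬((n ≥ 1 ∧ m ≥ 2) ∨ (m ≥ 1 ∧ n ≥ 2)) := by
      simp [canFormTeam] at h; omega
    rw [PySem.Int.floordiv_eq_ediv_of_pos (by omega : (0:Int) < 3)]
    omega
termination_by (n + m).toNat
decreasing_by
  · simp [canFormTeam] at h; omega
  · simp [canFormTeam] at h; omega

-- ===== VERDICT (by name: the statement is the Claim_ definition above) =====
theorem max_can_form_spec : Claim_equal_max_can_form := by
  intro n m _
  unfold Spec_max_can_form max_can_form max_can_form_alt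
  rw [maxCanFormLoop_eq]
  omega
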